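-- pv_equiv track=rewrite | github.com/tianfei212/face_fusion_zy_new | integrated_face_swap/backend/realtime_pipeline/preprocess.py | pick_src_input_name
-- ===== SOURCE A (Python) =====
-- def pick_src_input_name(names: list[str]) -> str:
--     for n in names:
--         if "src" in n.lower():
--             return n
--     for n in names:
--         if "input" in n.lower():
--             return n
--     return names[0]
-- ===== SOURCE B (Python) =====
-- def pick_src_input_name(names: list[str]) -> str:
--     def level(n):
--         low = n.lower()
--         return 0 if "src" in low else (1 if "input" in low else 2)
--     return min(enumerate(names), key=lambda p: (level(p[1]), p[0]))[1]
-- ===== Notes on version B (the rewrite author's own statement) =====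
-- stated objective: alternative
-- what changed: Instead of A's two staged scans plus fallback, B assigns each name a priority level (0 for 'src', 1 for 'input', 2 otherwise) and returns the single min over enumerate(names) keyed by (level, index).
import Mathlib
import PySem

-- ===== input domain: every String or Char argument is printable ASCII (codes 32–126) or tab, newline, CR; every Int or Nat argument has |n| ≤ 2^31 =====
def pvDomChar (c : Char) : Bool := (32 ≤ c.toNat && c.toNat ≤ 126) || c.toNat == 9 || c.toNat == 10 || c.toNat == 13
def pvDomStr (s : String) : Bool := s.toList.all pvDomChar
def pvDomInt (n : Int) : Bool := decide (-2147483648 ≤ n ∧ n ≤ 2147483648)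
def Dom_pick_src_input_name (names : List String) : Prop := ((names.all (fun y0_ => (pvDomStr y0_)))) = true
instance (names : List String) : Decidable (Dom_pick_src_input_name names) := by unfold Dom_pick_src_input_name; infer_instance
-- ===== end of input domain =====

-- B replaces A's two staged scans by a single min over enumerate(names) keyed by (priority level, index) — alternative algorithm, same cost.


-- ===== PORT A =====
-- first loop: return the first name whose lowercase contains "src"
def pickSrcLoop : List String → Option String
  | [] => none
  | n :: rest =>
    if PySem.Str.isIn "src" (PySem.Str.lower n) then some n else pickSrcLoop rest

-- second loop: return the first name whose lowercase contains "input"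
def pickInputLoop : List String → Option String
  | [] => none
  | n :: rest =>
    if PySem.Str.isIn "input" (PySem.Str.lower n) then some n else pickInputLoop rest

def pick_src_input_name (names : List String) : String :=
  match pickSrcLoop names with
  | some n => n
  | none =>
    match pickInputLoop names with
    | some n => n
    | none => PySem.List.pyGetD names 0 ""   -- names[0]; in range under Pre_ (names ≠ [])

-- ===== PORT B =====
-- level(n): 0 if 'src' in n.lower(), 1 if 'input' in n.lower(), else 2
def pvLevel (n : String) : Int :=
  if PySem.Str.isIn "src" (PySem.Str.lower n) then 0
  else if PySem.Str.isIn "input" (PySem.Str.lower n) then 1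
  else 2

-- min(enumerate(names), key=lambda p: (level(p[1]), p[0]))[1]
def pick_src_input_name_alt (names : List String) : String :=
  match PySem.List.min2? (PySem.List.enumerate names) (fun p => pvLevel p.2) (fun p => p.1) with
  | some p => p.2
  | none => ""   -- min() over the empty sequence raises ValueError; excluded by Pre_

-- ===== PRECONDITION & SPEC =====
-- Pre_ excludes exactly the empty list, on which A raises IndexError (and B's min raises ValueError).
def Pre_pick_src_input_name (names : List String) : Prop := names ≠ []
instance (names : List String) : Decidable (Pre_pick_src_input_name names) := by
  unfold Pre_pick_src_input_name; infer_instance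
def pvWitness_pick_src_input_name : List String := (["foo"])

def Spec_pick_src_input_name (names : List String) (out : String) : Prop := out = pick_src_input_name_alt names
instance (names : List String) (out : String) : Decidable (Spec_pick_src_input_name names out) := by unfold Spec_pick_src_input_name; infer_instance

-- ===== CLAIM (what is proved, stated in full; the proofs are below) =====
def Claim_equal_pick_src_input_name : Prop := ∀ (names : List String), Dom_pick_src_input_name names → Pre_pick_src_input_name names → Spec_pick_src_input_name names (pick_src_input_name names)

-- ===== LEMMAS AND PROOFS =====

-- keep-the-better step of B's fold once the tie-breaking index is known to be larger
def pvF (m x : Int × String) : Int × String :=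
  if pvLevel x.2 < pvLevel m.2 then x else m

theorem pvLevel_nonneg (n : String) : 0 ≤ pvLevel n := by
  unfold pvLevel; split_ifs <;> norm_num

-- with strictly increasing indices, min2?'s lexicographic fold is the level-only fold pvF
theorem min2?_foldl_eq (l : List (Int × String)) (m : Int × String)
    (hinc : ∀ q ∈ l, m.1 < q.1) (hp : l.Pairwise (fun a b => a.1 < b.1)) :
    PySem.List.min2? (m :: l) (fun p => pvLevel p.2) (fun p => p.1)
      = some (List.foldl pvF m l) := by
  induction l generalizing m with
  | nil => simp [PySem.List.min2?, List.foldl]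
  | cons x l ih =>
    have hmx : m.1 < x.1 := hinc x (by simp)
    have hnx : ¬ x.1 < m.1 := by omega
    rcases List.pairwise_cons.mp hp with ⟨hx, hp'⟩
    have hstep : PySem.List.min2? (m :: x :: l) (fun p => pvLevel p.2) (fun p => p.1)
        = PySem.List.min2? (pvF m x :: l) (fun p => pvLevel p.2) (fun p => p.1) := by
      simp only [PySem.List.min2?, List.foldl]
      congr 1
      by_cases h : pvLevel x.2 < pvLevel m.2 <;> simp [pvF, h, hnx]
    rw [hstep]
    have hres := ih (pvF m x)
      (fun q hq => by
        by_cases h : pvLevel x.2 < pvLevel m.2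
        · simpa [pvF, h] using hx q hq
        · simpa [pvF, h] using lt_trans hmx (hx q hq))
      hp'
    rw [hres]
    simp only [List.foldl]

theorem foldl_pvF_lvl0 (l : List (Int × String)) (m : Int × String)
    (h : pvLevel m.2 = 0) : List.foldl pvF m l = m := by
  induction l with
  | nil => rfl
  | cons x l ih =>
    have : ¬ pvLevel x.2 < pvLevel m.2 := by have := pvLevel_nonneg x.2; omega
    simpa [List.foldl, pvF, this] using ih

theorem foldl_pvF_lvl1 (l : List (Int × String)) (m : Int × String)
    (h : pvLevel m.2 = 1) :
    List.foldl pvF m l = (List.find? (fun q => pvLevel q.2 == 0) l).getD m := by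
  induction l generalizing m with
  | nil => rfl
  | cons x l ih =>
    simp only [List.foldl]
    by_cases h0 : pvLevel x.2 = 0
    · have hlt : pvLevel x.2 < pvLevel m.2 := by omega
      rw [show pvF m x = x from if_pos hlt, foldl_pvF_lvl0 l x h0,
        List.find?_cons_of_pos (by simpa using h0)]
      rfl
    · have hge : ¬ pvLevel x.2 < pvLevel m.2 := by
        have := pvLevel_nonneg x.2; omega
      rw [show pvF m x = m from if_neg hge, ih m h,
        List.find?_cons_of_neg (by simpa using h0)]

theorem foldl_pvF_lvl2 (l : List (Int × String)) (m : Int × String)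
    (h : pvLevel m.2 = 2) :
    List.foldl pvF m l =
      match List.find? (fun q => pvLevel q.2 == 0) l with
      | some q => q
      | none => (List.find? (fun q => pvLevel q.2 == 1) l).getD m := by
  induction l generalizing m with
  | nil => rfl
  | cons x l ih =>
    simp only [List.foldl]
    by_cases h0 : pvLevel x.2 = 0
    · have hlt : pvLevel x.2 < pvLevel m.2 := by omega
      rw [show pvF m x = x from if_pos hlt, foldl_pvF_lvl0 l x h0,
        List.find?_cons_of_pos (by simpa using h0)]
    · by_cases h1 : pvLevel x.2 = 1
      · have hlt : pvLevel x.2 < pvLevel m.2 := by omega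
        rw [show pvF m x = x from if_pos hlt, foldl_pvF_lvl1 l x h1,
          List.find?_cons_of_neg (by simpa using h0),
          List.find?_cons_of_pos (by simpa using h1)]
        cases List.find? (fun q => pvLevel q.2 == 0) l <;> rfl
      · have hge : ¬ pvLevel x.2 < pvLevel m.2 := by
          have := pvLevel_nonneg x.2; omega
        rw [show pvF m x = m from if_neg hge, ih m h,
          List.find?_cons_of_neg (by simpa using h0),
          List.find?_cons_of_neg (by simpa using h1)]

-- finding by a predicate on the name commutes with enumerate
theorem find?_enumerate (pred : String → Bool) (xs : List String) (s : Int) :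
    (List.find? (fun q => pred q.2) (PySem.List.enumerate xs s)).map (·.2)
      = List.find? pred xs := by
  induction xs generalizing s with
  | nil => rfl
  | cons x xs ih =>
    rw [PySem.List.enumerate_cons]
    by_cases h : pred x
    · simp [List.find?, h]
    · simp [List.find?, h, ih (s + 1)]

-- A's first loop is find? on level 0
theorem pickSrcLoop_eq (names : List String) :
    pickSrcLoop names = List.find? (fun n => pvLevel n == 0) names := by
  induction names with
  | nil => rfl
  | cons n rest ih =>
    by_cases hs : PySem.Chars.isIn ['s','r','c'] (PySem.Chars.lower n.toList) = true
    · simp [pickSrcLoop, List.find?, hs, pvLevel]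
    · by_cases hi : PySem.Chars.isIn ['i','n','p','u','t'] (PySem.Chars.lower n.toList) = true <;>
        simp [pickSrcLoop, List.find?, hs, hi, pvLevel, ih]

-- when no name contains 'src', A's second loop is find? on level 1
theorem pickInputLoop_eq (names : List String) (hns : pickSrcLoop names = none) :
    pickInputLoop names = List.find? (fun n => pvLevel n == 1) names := by
  induction names with
  | nil => rfl
  | cons n rest ih =>
    by_cases hs : PySem.Chars.isIn ['s','r','c'] (PySem.Chars.lower n.toList) = true
    · simp [pickSrcLoop, hs] at hns
    · rw [show pickSrcLoop (n :: rest) = pickSrcLoop rest from by simp [pickSrcLoop, hs]] at hns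
      by_cases hi : PySem.Chars.isIn ['i','n','p','u','t'] (PySem.Chars.lower n.toList) = true <;>
        simp [pickInputLoop, List.find?, hs, hi, pvLevel, ih hns]

-- B on n :: rest, reduced to the level-only fold
theorem alt_eq_fold (n : String) (rest : List String) :
    pick_src_input_name_alt (n :: rest)
      = (List.foldl pvF (0, n) (PySem.List.enumerate rest 1)).2 := by
  unfold pick_src_input_name_alt
  rw [PySem.List.enumerate_cons, zero_add,
    min2?_foldl_eq (PySem.List.enumerate rest 1) (0, n)
      (fun q hq => by
        rcases (PySem.List.mem_enumerate_iff _ _ _).mp hq with ⟨k, hk, rfl⟩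
        simp; omega)
      (PySem.List.pairwise_lt_enumerate rest 1)]

-- ===== VERDICT (by name: the statement is the Claim_ definition above) =====
set_option maxHeartbeats 1000000 in
theorem pick_src_input_name_spec : Claim_equal_pick_src_input_name := by
  intro names _ hne
  unfold Spec_pick_src_input_name
  obtain ⟨n, rest, rfl⟩ : ∃ n rest, names = n :: rest := by
    cases names with
    | nil => exact absurd rfl hne
    | cons n rest => exact ⟨n, rest, rfl⟩
  rw [alt_eq_fold]
  by_cases hs : PySem.Chars.isIn ['s','r','c'] (PySem.Chars.lower n.toList) = true
  · have h0 : pvLevel n = 0 := by simp [pvLevel, hs]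
    rw [foldl_pvF_lvl0 (PySem.List.enumerate rest 1) ((0 : Int), n) h0]
    simp [pick_src_input_name, pickSrcLoop, hs]
  · have hfind0 := find?_enumerate (fun n => pvLevel n == 0) rest 1
    by_cases hi : PySem.Chars.isIn ['i','n','p','u','t'] (PySem.Chars.lower n.toList) = true
    · have h1 : pvLevel n = 1 := by simp [pvLevel, hs, hi]
      rw [foldl_pvF_lvl1 (PySem.List.enumerate rest 1) ((0 : Int), n) h1]
      simp only [pick_src_input_name]
      rw [show pickSrcLoop (n :: rest) = pickSrcLoop rest from by simp [pickSrcLoop, hs], pickSrcLoop_eq rest]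
      cases hf : List.find? (fun n => pvLevel n == 0) rest with
      | none =>
        rw [hf] at hfind0
        rw [Option.map_eq_none_iff] at hfind0
        simp [hfind0, pickInputLoop, hi]
      | some m =>
        rw [hf] at hfind0
        rcases Option.map_eq_some_iff.mp hfind0 with ⟨q, hq, hq2⟩
        simp [hq, hq2]
    · have h2 : pvLevel n = 2 := by simp [pvLevel, hs, hi]
      rw [foldl_pvF_lvl2 (PySem.List.enumerate rest 1) ((0 : Int), n) h2]
      simp only [pick_src_input_name]
      rw [show pickSrcLoop (n :: rest) = pickSrcLoop rest from by simp [pickSrcLoop, hs], pickSrcLoop_eq rest]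
      cases hf : List.find? (fun n => pvLevel n == 0) rest with
      | some m =>
        rw [hf] at hfind0
        rcases Option.map_eq_some_iff.mp hfind0 with ⟨q, hq, hq2⟩
        simp [hq, hq2]
      | none =>
        rw [hf] at hfind0
        rw [Option.map_eq_none_iff] at hfind0
        have hns : pickSrcLoop rest = none := by rw [pickSrcLoop_eq]; exact hf
        have hfind1 := find?_enumerate (fun n => pvLevel n == 1) rest 1
        simp only [hfind0]
        rw [show pickInputLoop (n :: rest) = pickInputLoop rest from by simp [pickInputLoop, hi], pickInputLoop_eq rest hns]
        cases hg : List.find? (fun n => pvLevel n == 1) rest with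
        | some m =>
          rw [hg] at hfind1
          rcases Option.map_eq_some_iff.mp hfind1 with ⟨q, hq, hq2⟩
          simp [hq, hq2]
        | none =>
          rw [hg] at hfind1
          rw [Option.map_eq_none_iff] at hfind1
          simp [hfind1, PySem.List.pyGetD, PySem.List.pyGet?, PySem.List.pyIdx?]
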